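-- pv_equiv track=rewrite | github.com/anubhab001/baksheesh | reference-software/baksheesh_gift.py | _invert_post_process_words
-- ===== SOURCE A (Python) =====
-- from typing import Iterable, List, Sequence
--
-- def _invert_post_process_words(words: Sequence[int]) -> List[int]:
--     """Invert post-processing for decryption."""
--     out = [0] * 8
--     for group in range(8):
--         src = words[group]
--         word = 0
--         for sbox in range(4):
--             nib = (src >> (4 * (3 - sbox))) & 0xF
--             word |= nib << (4 * sbox)
--         out[7 - group] = word
--     return out
-- ===== SOURCE B (Python) =====
-- from typing import List, Sequence
--
-- def _invert_post_process_words(words: Sequence[int]) -> List[int]: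
--     """Invert post-processing for decryption."""
--     # Stage 1: flatten the 8 words into one 32-entry nibble stream,
--     # least-significant nibble first within each word.
--     nibs = []
--     for g in range(8):
--         w = words[g]
--         for _ in range(4):
--             nibs.append(w & 0xF)
--             w >>= 4
--     # Stage 2: regroup chunks of 4 in reverse word order, Horner-folding
--     # each chunk most-significant-first.  Reversing the word order while
--     # keeping each word's LSB-first chunk MSB-first is exactly "reverse
--     # words and reverse nibbles within each word".
--     out = []
--     for start in range(28, -4, -4):
--         val = 0
--         for n in nibs[start:start + 4]:
--             val = val * 16 + n
--         out.append(val)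
--     return out
-- ===== Notes on version B (the rewrite author's own statement) =====
-- stated objective: alternative
-- what changed: Instead of per-word nibble reversal into a back-indexed preallocated array, B flattens all 8 words into one 32-entry nibble stream (LSB-first per word) and then regroups 4-nibble chunks in reverse word order with a Horner fold, exploiting that the whole operation is a reversal of the flat nibble stream.
import Mathlib
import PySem

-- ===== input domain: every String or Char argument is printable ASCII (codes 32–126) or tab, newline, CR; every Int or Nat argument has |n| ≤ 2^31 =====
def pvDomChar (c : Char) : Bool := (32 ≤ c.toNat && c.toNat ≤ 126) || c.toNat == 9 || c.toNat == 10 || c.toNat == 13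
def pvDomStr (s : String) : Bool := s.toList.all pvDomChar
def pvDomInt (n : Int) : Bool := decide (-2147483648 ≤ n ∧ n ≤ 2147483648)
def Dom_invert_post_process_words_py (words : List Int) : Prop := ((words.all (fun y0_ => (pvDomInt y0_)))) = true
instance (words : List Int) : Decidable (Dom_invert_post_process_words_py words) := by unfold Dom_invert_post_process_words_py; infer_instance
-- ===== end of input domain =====

-- B flattens the 8 words into one 32-entry nibble stream and regroups 4-nibble chunks in
-- reverse word order with a Horner fold (objective: alternative algorithm, same cost).

-- ===== PORT A =====
def invert_post_process_words_py (words : List Int) : List Int :=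
  (List.range 8).foldl (fun (out : List Int) (group : Nat) =>
    let src := PySem.List.pyGetD words (↑group) 0
    let word := (List.range 4).foldl (fun (word : Int) (sbox : Nat) =>
      PySem.Int.bor word ((PySem.Int.band (src >>> (4 * (3 - sbox))) 15) <<< (4 * sbox))) 0
    out.set (7 - group) word) (List.replicate 8 0)

-- ===== PORT B =====
-- stage 1 of Source B: the flat 32-entry nibble stream, LSB-first within each word
def pvNibs (words : List Int) : List Int :=
  (List.range 8).foldl (fun (acc : List Int) (g : Nat) =>
    ((List.range 4).foldl (fun (p : List Int × Int) (_ : Nat) =>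
      (p.1 ++ [PySem.Int.band p.2 15], p.2 >>> (4:Nat))) (acc, PySem.List.pyGetD words (↑g) 0)).1) []

-- stage 2 of Source B: regroup chunks of 4 in reverse word order, Horner-folding MSB-first
def invert_post_process_words_py_alt (words : List Int) : List Int :=
  let nibs := pvNibs words
  (PySem.List.pyRange 28 (-4) (-4)).foldl (fun (out : List Int) (start : Int) =>
    out ++ [(PySem.List.slice nibs (some start) (some (start + 4))).foldl
      (fun val n => val * 16 + n) 0]) []

-- ===== PRECONDITION & SPEC =====
-- Python A (and B) raise IndexError on lists with fewer than 8 elements; exactly those are excluded.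
def Pre_invert_post_process_words_py (words : List Int) : Prop := 8 ≤ words.length
instance (words : List Int) : Decidable (Pre_invert_post_process_words_py words) := by
  unfold Pre_invert_post_process_words_py; infer_instance

def pvWitness_invert_post_process_words_py : List Int := [0, 1, 2, 3, 4, 5, 6, 7]

def Spec_invert_post_process_words_py (words : List Int) (out : List Int) : Prop :=
  out = invert_post_process_words_py_alt words
instance (words : List Int) (out : List Int) : Decidable (Spec_invert_post_process_words_py words out) := by
  unfold Spec_invert_post_process_words_py; infer_instance

-- ===== CLAIM (what is proved, stated in full; the proofs are below) =====
def Claim_equal_invert_post_process_words_py : Prop := ∀ (words : List Int),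
  Dom_invert_post_process_words_py words → Pre_invert_post_process_words_py words →
    Spec_invert_post_process_words_py words (invert_post_process_words_py words)

-- ===== LEMMAS AND PROOFS =====

-- A's inner 4-iteration nibble loop, as it appears (up to defeq) inside A's port.
def pvInner (src : Int) : Int :=
  (List.range 4).foldl (fun (word : Int) (sbox : Nat) =>
    PySem.Int.bor word ((PySem.Int.band (src >>> (4 * (3 - sbox))) 15) <<< (4 * sbox))) 0

-- one word's LSB-first nibble chunk of B's stream
def pvC (w : Int) : List Int :=
  [PySem.Int.band w 15, PySem.Int.band (w >>> (4:Nat)) 15,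
   PySem.Int.band ((w >>> (4:Nat)) >>> (4:Nat)) 15,
   PySem.Int.band (((w >>> (4:Nat)) >>> (4:Nat)) >>> (4:Nat)) 15]

-- B's per-word value: the Horner fold of that chunk (up to defeq).
def pvChunk (w : Int) : Int :=
  ((((0 : Int) * 16 + PySem.Int.band w 15) * 16 + PySem.Int.band (w >>> (4:Nat)) 15) * 16 +
      PySem.Int.band ((w >>> (4:Nat)) >>> (4:Nat)) 15) * 16 +
    PySem.Int.band (((w >>> (4:Nat)) >>> (4:Nat)) >>> (4:Nat)) 15

lemma pvBand15 (x : Int) : PySem.Int.band x 15 = x % 16 := by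
  unfold PySem.Int.band
  by_cases hx : 0 ≤ x
  · rw [if_pos hx, if_pos (by norm_num : (0:Int) ≤ 15)]
    have h : x.toNat &&& 15 = x.toNat % 16 := Nat.and_two_pow_sub_one_eq_mod _ 4
    rw [show ((15:Int).toNat) = 15 from rfl, h]
    omega
  · rw [if_neg hx, if_pos (by norm_num : (0:Int) ≤ 15)]
    have h : (-x - 1).toNat &&& 15 = (-x - 1).toNat % 16 := Nat.and_two_pow_sub_one_eq_mod _ 4
    rw [show ((15:Int).toNat) = 15 from rfl, Nat.and_comm, h]
    omega

lemma pvBorZero (b : Int) (hb : 0 ≤ b) : PySem.Int.bor 0 b = b := by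
  rw [PySem.Int.bor_of_nonneg le_rfl hb, show (0:Int).toNat = 0 from rfl, Nat.zero_or]
  exact Int.toNat_of_nonneg hb

lemma pvBorAdd (x c m : Int) (i : Nat) (hm : m = 2 ^ i) (hx0 : 0 ≤ x) (hx : x < m)
    (hc : 0 ≤ c) : PySem.Int.bor x (c * m) = c * m + x := by
  subst hm
  have hp : (0:Int) < 2 ^ i := by positivity
  have hcm : (0:Int) ≤ c * 2 ^ i := by positivity
  have hcast : ((2 ^ i : Nat) : Int) = 2 ^ i := by push_cast; ring
  rw [PySem.Int.bor_of_nonneg hx0 hcm]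
  have h2 : ((2:Int) ^ i).toNat = 2 ^ i := by omega
  have hmul : (c * 2 ^ i).toNat = 2 ^ i * c.toNat := by
    rw [Int.toNat_mul hc hp.le, h2, Nat.mul_comm]
  have hxlt : x.toNat < 2 ^ i := by
    have hx2 : x < ((2 ^ i : Nat) : Int) := by rw [hcast]; exact hx
    omega
  have hor := Nat.two_pow_add_eq_or_of_lt hxlt c.toNat
  rw [hmul, Nat.lor_comm, ← hor]
  have hcc : ((2 ^ i * c.toNat + x.toNat : Nat) : Int) = (2 ^ i : Int) * c.toNat + x.toNat := by
    push_cast; ring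
  rw [hcc, Int.toNat_of_nonneg hc, Int.toNat_of_nonneg hx0]; ring

-- A's accumulated word in div/mod normal form.
lemma pvInnerEq (w : Int) :
    pvInner w = w % 16 * 4096 + w / 16 % 16 * 256 + w / 256 % 16 * 16 + w / 4096 % 16 := by
  unfold pvInner
  have hr : List.range 4 = [0, 1, 2, 3] := by decide
  rw [hr]
  simp only [List.foldl_cons, List.foldl_nil]
  norm_num
  rw [Int.shiftRight_eq_div_pow w 12, Int.shiftRight_eq_div_pow w 8, Int.shiftRight_eq_div_pow w 4]
  norm_num
  rw [pvBand15, pvBand15, pvBand15, pvBand15]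
  rw [Int.shiftLeft_eq, Int.shiftLeft_eq, Int.shiftLeft_eq]
  norm_num
  set n0 := w % 16 with hn0
  set n1 := w / 16 % 16 with hn1
  set n2 := w / 256 % 16 with hn2
  set n3 := w / 4096 % 16 with hn3
  have b0 : 0 ≤ n0 ∧ n0 < 16 := ⟨Int.emod_nonneg _ (by norm_num), Int.emod_lt_of_pos _ (by norm_num)⟩
  have b1 : 0 ≤ n1 ∧ n1 < 16 := ⟨Int.emod_nonneg _ (by norm_num), Int.emod_lt_of_pos _ (by norm_num)⟩
  have b2 : 0 ≤ n2 ∧ n2 < 16 := ⟨Int.emod_nonneg _ (by norm_num), Int.emod_lt_of_pos _ (by norm_num)⟩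
  have b3 : 0 ≤ n3 ∧ n3 < 16 := ⟨Int.emod_nonneg _ (by norm_num), Int.emod_lt_of_pos _ (by norm_num)⟩
  rw [pvBorZero n3 b3.1]
  rw [pvBorAdd n3 n2 16 4 (by norm_num) b3.1 (by omega) b2.1]
  rw [pvBorAdd _ n1 256 8 (by norm_num) (by omega) (by omega) b1.1]
  rw [pvBorAdd _ n0 4096 12 (by norm_num) (by omega) (by omega) b0.1]
  omega

-- B's Horner-folded chunk in the same normal form.
lemma pvChunkEq (w : Int) :
    pvChunk w = w % 16 * 4096 + w / 16 % 16 * 256 + w / 256 % 16 * 16 + w / 4096 % 16 := by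
  unfold pvChunk
  simp only [Int.shiftRight_eq_div_pow, pvBand15]
  norm_num
  omega

lemma pvWordEq (w : Int) : pvInner w = pvChunk w := by rw [pvInnerEq, pvChunkEq]

-- stage 1 produces the 8 concatenated per-word chunks
lemma pvNibsEq (words : List Int) :
    pvNibs words =
      pvC (PySem.List.pyGetD words 0 0) ++ pvC (PySem.List.pyGetD words 1 0) ++
      pvC (PySem.List.pyGetD words 2 0) ++ pvC (PySem.List.pyGetD words 3 0) ++
      pvC (PySem.List.pyGetD words 4 0) ++ pvC (PySem.List.pyGetD words 5 0) ++
      pvC (PySem.List.pyGetD words 6 0) ++ pvC (PySem.List.pyGetD words 7 0) := by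
  simp only [pvNibs, pvC, show List.range 8 = [0,1,2,3,4,5,6,7] from rfl,
    show List.range 4 = [0,1,2,3] from rfl, List.foldl_cons, List.foldl_nil]
  simp

-- B evaluated: the 8 chunk Horner folds in reverse word order
lemma pvAltEq (words : List Int) :
    invert_post_process_words_py_alt words =
      [pvChunk (PySem.List.pyGetD words 7 0), pvChunk (PySem.List.pyGetD words 6 0),
       pvChunk (PySem.List.pyGetD words 5 0), pvChunk (PySem.List.pyGetD words 4 0),
       pvChunk (PySem.List.pyGetD words 3 0), pvChunk (PySem.List.pyGetD words 2 0),
       pvChunk (PySem.List.pyGetD words 1 0), pvChunk (PySem.List.pyGetD words 0 0)] := by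
  unfold invert_post_process_words_py_alt
  rw [show PySem.List.pyRange 28 (-4) (-4) = [28, 24, 20, 16, 12, 8, 4, 0] from by decide]
  simp only [List.foldl_cons, List.foldl_nil, pvNibsEq, pvC, List.cons_append, List.nil_append]
  rfl

-- ===== VERDICT (by name: the statement is the Claim_ definition above) =====
theorem invert_post_process_words_py_spec : Claim_equal_invert_post_process_words_py := by
  intro words _ _
  unfold Spec_invert_post_process_words_py
  have hA : invert_post_process_words_py words =
      [pvInner (PySem.List.pyGetD words 7 0), pvInner (PySem.List.pyGetD words 6 0),
       pvInner (PySem.List.pyGetD words 5 0), pvInner (PySem.List.pyGetD words 4 0),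
       pvInner (PySem.List.pyGetD words 3 0), pvInner (PySem.List.pyGetD words 2 0),
       pvInner (PySem.List.pyGetD words 1 0), pvInner (PySem.List.pyGetD words 0 0)] := rfl
  rw [hA, pvAltEq]
  simp only [pvWordEq]
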